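-- pv_equiv track=rewrite | github.com/PingjieYou/Air-Condition | ga_maze.py | best_solution
-- ===== SOURCE A (Python) =====
-- def inter_steps(point1, point2, direction):
--     """
--     Takes in two points and the direction of the path between them and returns the intermediate steps between them.
--     """
--     steps = []
--     if direction == "c":  # column first
--         if point1[0] < point2[0]:
--             steps.extend([(i, point1[1]) for i in range(point1[0] + 1, point2[0] + 1)])
--         elif point1[0] > point2[0]:
--             steps.extend([(i, point1[1]) for i in range(point1[0] - 1, point2[0] - 1, -1)])
--         steps.append(point2)
--     elif direction == "r":  # row first
--         if point1[0] < point2[0]: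
--             steps.extend([(i, point1[1] + 1) for i in range(point1[0], point2[0] + 1)])
--         elif point1[0] > point2[0]:
--             steps.extend([(i, point1[1] + 1) for i in range(point1[0], point2[0] - 1, -1)])
--         else:
--             steps.append(point2)
--     return steps
--
-- def path(individual, direction):
--     """
--     Takes in the population list and the direction list and returns the complete path using the inter_steps function.
--     """
--     complete_path = [individual[0]]
--     for i in range(len(individual) - 1):
--         # Get the intermediate steps between the current and the next point in the population
--         complete_path.extend(inter_steps(individual[i], individual[i + 1], direction))
--     return complete_path
--
-- def best_solution(solutions):
--     """Takes a list of solutions and returns the best individual(list) and direction"""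
--     # Initialize the best individual and direction as the first solution in the list
--     best_individual, best_direction = solutions[0]
--     # Calculate the length of the path for the best solution
--     min_length = len(path(best_individual, best_direction))
--
--     for individual, direction in solutions[1:]:
--         # Calculate the length of the path for the best solution
--         current_length = len(path(individual, direction))
--         # If the current solution is better than the best solution, update the best solution
--         if current_length < min_length:
--             min_length = current_length
--             best_individual = individual
--             best_direction = direction
--     return best_individual, best_direction
-- ===== SOURCE B (Python) =====
-- def best_solution(solutions):
--     """Takes a list of solutions and returns the best individual(list) and direction"""
--     def path_length(solution):
--         individual, direction = solution
--         if direction == "c" or direction == "r":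
--             # each segment expands to |dx| + 1 steps; the start point adds 1
--             return 1 + sum(abs(p[0] - q[0]) + 1
--                            for p, q in zip(individual, individual[1:]))
--         return 1
--     return min(solutions, key=path_length)
-- ===== Notes on version B (the rewrite author's own statement) =====
-- stated objective: faster
-- what changed: B computes each solution's expanded path length arithmetically (1 + sum of |dx|+1 per waypoint segment, or 1 for an unknown direction) instead of materialising the full step list with inter_steps/path, and picks the first minimum with min(key=...).
import Mathlib
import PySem

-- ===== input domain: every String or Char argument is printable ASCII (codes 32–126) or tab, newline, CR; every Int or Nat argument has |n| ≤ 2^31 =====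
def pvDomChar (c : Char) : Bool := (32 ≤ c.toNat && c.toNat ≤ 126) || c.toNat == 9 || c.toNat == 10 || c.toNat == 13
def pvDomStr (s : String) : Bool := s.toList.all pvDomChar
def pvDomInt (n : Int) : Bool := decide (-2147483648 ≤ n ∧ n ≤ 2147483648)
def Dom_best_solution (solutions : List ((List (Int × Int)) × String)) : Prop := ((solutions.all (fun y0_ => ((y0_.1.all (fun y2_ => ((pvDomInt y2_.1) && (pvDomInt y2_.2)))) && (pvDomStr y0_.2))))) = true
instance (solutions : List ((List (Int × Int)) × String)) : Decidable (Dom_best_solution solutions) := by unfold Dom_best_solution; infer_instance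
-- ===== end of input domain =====

-- B replaces A's list-building path/inter_steps with an arithmetic path length
-- (1 + Σ |dx|+1 per segment) and picks the first minimum with min(key=...): faster.

-- ===== PORT A =====
-- inter_steps(point1, point2, direction)
def interStepsA (p1 p2 : Int × Int) (direction : String) : List (Int × Int) :=
  if direction = "c" then
    (if p1.1 < p2.1 then (PySem.List.pyRange (p1.1 + 1) (p2.1 + 1) 1).map (fun i => (i, p1.2))
     else if p1.1 > p2.1 then (PySem.List.pyRange (p1.1 - 1) (p2.1 - 1) (-1)).map (fun i => (i, p1.2))
     else []) ++ [p2]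
  else if direction = "r" then
    if p1.1 < p2.1 then (PySem.List.pyRange p1.1 (p2.1 + 1) 1).map (fun i => (i, p1.2 + 1))
    else if p1.1 > p2.1 then (PySem.List.pyRange p1.1 (p2.1 - 1) (-1)).map (fun i => (i, p1.2 + 1))
    else [p2]
  else []

-- path(individual, direction); individual[0] raises IndexError on [] (outside Pre_)
def pathA (individual : List (Int × Int)) (direction : String) : List (Int × Int) :=
  match individual with
  | [] => []  -- Python raises IndexError here; excluded by Pre_
  | p0 :: _ =>
    (PySem.List.pyRange 0 (individual.length - 1) 1).foldl
      (fun acc i =>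
        acc ++ interStepsA ((PySem.List.pyGet? individual i).getD (0, 0))
                           ((PySem.List.pyGet? individual (i + 1)).getD (0, 0)) direction)
      [p0]

def best_solution (solutions : List ((List (Int × Int)) × String)) : (List (Int × Int)) × String :=
  match solutions with
  | [] => ([], "")  -- Python raises IndexError (solutions[0]); excluded by Pre_
  | (bi, bd) :: rest =>
    let st : (List (Int × Int)) × String × Int :=
      rest.foldl
        (fun st s =>
          let cl : Int := (pathA s.1 s.2).length
          if cl < st.2.2 then (s.1, s.2, cl) else st)
        (bi, bd, ((pathA bi bd).length : Int))
    (st.1, st.2.1)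

-- ===== PORT B =====
-- path_length(solution): arithmetic length of the expanded path
def pathLenB (s : (List (Int × Int)) × String) : Int :=
  if s.2 = "c" ∨ s.2 = "r" then
    1 + (s.1.zip (s.1.drop 1)).foldl (fun acc pq => acc + ((pq.1.1 - pq.2.1).natAbs + 1 : Int)) 0
  else 1

def best_solution_alt (solutions : List ((List (Int × Int)) × String)) : (List (Int × Int)) × String :=
  (PySem.List.min? solutions pathLenB).getD ([], "")  -- min(...) raises on []; excluded by Pre_

-- ===== PRECONDITION & SPEC =====
-- A raises IndexError on an empty solution list and on any empty individual (path does individual[0]).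
def Pre_best_solution (solutions : List ((List (Int × Int)) × String)) : Prop :=
  solutions ≠ [] ∧ ∀ s ∈ solutions, s.1 ≠ []
instance (solutions : List ((List (Int × Int)) × String)) : Decidable (Pre_best_solution solutions) := by
  unfold Pre_best_solution; infer_instance
def pvWitness_best_solution : (List ((List (Int × Int)) × String)) :=
  [([(0, 0), (2, 1)], "c"), ([(0, 0)], "r")]

def Spec_best_solution (solutions : List ((List (Int × Int)) × String)) (out : (List (Int × Int)) × String) : Prop := out = best_solution_alt solutions
instance (solutions : List ((List (Int × Int)) × String)) (out : (List (Int × Int)) × String) : Decidable (Spec_best_solution solutions out) := by unfold Spec_best_solution; infer_instance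

-- ===== CLAIM (what is proved, stated in full; the proofs are below) =====
def Claim_equal_best_solution : Prop := ∀ (solutions : List ((List (Int × Int)) × String)), Dom_best_solution solutions → Pre_best_solution solutions → Spec_best_solution solutions (best_solution solutions)

-- ===== LEMMAS AND PROOFS =====

-- expanded length of one segment
theorem length_interStepsA (p1 p2 : Int × Int) (d : String) :
    (interStepsA p1 p2 d).length =
      if d = "c" ∨ d = "r" then (p1.1 - p2.1).natAbs + 1 else 0 := by
  unfold interStepsA
  by_cases hc : d = "c" <;> by_cases hr : d = "r" <;>
    simp [hc, hr] <;>
    rcases lt_trichotomy p1.1 p2.1 with h | h | h <;>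
    simp [h, not_lt_of_gt] <;> omega

-- pyRange 0 m 1 enumerates the naturals below m
theorem pyRange_zero_nat (m : ℕ) :
    PySem.List.pyRange 0 m 1 = List.map (Nat.cast : ℕ → ℤ) (List.range m) := by
  unfold PySem.List.pyRange
  rcases Nat.eq_zero_or_pos m with h | h
  · simp [h]
  · simp [h, List.map_eq_flatMap]

-- length of a foldl that appends g i for each i in range m
theorem range_foldl_append_length {β : Type} (g : ℕ → List β) (m : ℕ) (acc : List β) :
    ((List.range m).foldl (fun a i => a ++ g i) acc).length =
      acc.length + ∑ i ∈ Finset.range m, (g i).length := by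
  induction m generalizing acc with
  | zero => simp
  | succ m ih =>
    rw [List.range_succ, List.foldl_append, Finset.sum_range_succ, List.foldl_cons,
      List.foldl_nil, List.length_append, ih]
    omega

-- sum of |dx| + 1 over consecutive waypoint pairs
def segSum : List (Int × Int) → ℕ
  | p :: q :: t => (p.1 - q.1).natAbs + 1 + segSum (q :: t)
  | _ => 0

theorem sum_interSteps (d : String) :
    ∀ (ind : List (Int × Int)),
      ∑ i ∈ Finset.range (ind.length - 1),
          (interStepsA ((PySem.List.pyGet? ind (i : Int)).getD (0, 0))
            ((PySem.List.pyGet? ind ((i : Int) + 1)).getD (0, 0)) d).length =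
        if d = "c" ∨ d = "r" then segSum ind else 0
  | [] => by simp [segSum]
  | [p] => by simp [segSum]
  | p :: q :: t => by
    have ih := sum_interSteps d (q :: t)
    have hlen : (p :: q :: t : List (Int × Int)).length - 1
        = ((q :: t : List (Int × Int)).length - 1) + 1 := by simp
    rw [hlen, Finset.sum_range_succ']
    have hshift : ∀ i : ℕ,
        (interStepsA ((PySem.List.pyGet? (p :: q :: t) ((i + 1 : ℕ) : Int)).getD (0, 0))
          ((PySem.List.pyGet? (p :: q :: t) (((i + 1 : ℕ) : Int) + 1)).getD (0, 0)) d).length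
        = (interStepsA ((PySem.List.pyGet? (q :: t) ((i : ℕ) : Int)).getD (0, 0))
          ((PySem.List.pyGet? (q :: t) (((i : ℕ) : Int) + 1)).getD (0, 0)) d).length := by
      intro i
      have h1 : ((i : ℕ) : Int) + 1 = (((i + 1 : ℕ)) : Int) := by push_cast; ring
      have h2 : (((i + 1 : ℕ)) : Int) + 1 = (((i + 2 : ℕ)) : Int) := by push_cast; ring
      rw [h1, h2, PySem.List.pyGet?_natCast, PySem.List.pyGet?_natCast,
        PySem.List.pyGet?_natCast, PySem.List.pyGet?_natCast]
      simp
    have hsum : ∑ i ∈ Finset.range ((q :: t : List (Int × Int)).length - 1),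
        (interStepsA ((PySem.List.pyGet? (p :: q :: t) (((i : ℕ) + 1 : ℕ) : Int)).getD (0, 0))
          ((PySem.List.pyGet? (p :: q :: t) ((((i : ℕ) + 1 : ℕ) : Int) + 1)).getD (0, 0)) d).length
        = if d = "c" ∨ d = "r" then segSum (q :: t) else 0 := by
      rw [Finset.sum_congr rfl (fun i _ => hshift i)]
      exact ih
    have h0 : (interStepsA ((PySem.List.pyGet? (p :: q :: t) ((0 : ℕ) : Int)).getD (0, 0))
        ((PySem.List.pyGet? (p :: q :: t) (((0 : ℕ) : Int) + 1)).getD (0, 0)) d).length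
        = if d = "c" ∨ d = "r" then (p.1 - q.1).natAbs + 1 else 0 := by
      have h1 : (((0 : ℕ)) : Int) + 1 = (((1 : ℕ)) : Int) := by norm_num
      rw [h1, PySem.List.pyGet?_natCast, PySem.List.pyGet?_natCast]
      simp [length_interStepsA]
    push_cast at hsum h0 ⊢
    rw [hsum, h0]
    split_ifs <;> simp [segSum] <;> omega

theorem pathA_length (ind : List (Int × Int)) (d : String) (h : ind ≠ []) :
    (pathA ind d).length = 1 + (if d = "c" ∨ d = "r" then segSum ind else 0) := by
  match ind with
  | p0 :: t =>
    have e : pathA (p0 :: t) d =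
        (PySem.List.pyRange 0 (((p0 :: t : List (Int × Int)).length : Int) - 1) 1).foldl
          (fun acc i =>
            acc ++ interStepsA ((PySem.List.pyGet? (p0 :: t) i).getD (0, 0))
              ((PySem.List.pyGet? (p0 :: t) (i + 1)).getD (0, 0)) d)
          [p0] := rfl
    have hl : (((p0 :: t : List (Int × Int)).length : Int) - 1) = ((t.length : ℕ) : Int) := by
      simp
    rw [e, hl, pyRange_zero_nat, List.foldl_map, range_foldl_append_length]
    have hsum := sum_interSteps d (p0 :: t)
    simp only [List.length_cons, Nat.add_sub_cancel] at hsum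
    rw [hsum]
    simp

theorem zip_foldl : ∀ (xs : List (Int × Int)) (c : Int),
    (xs.zip (xs.drop 1)).foldl (fun acc pq => acc + ((pq.1.1 - pq.2.1).natAbs + 1 : Int)) c
      = c + segSum xs
  | [], c => by simp [segSum]
  | [p], c => by simp [segSum]
  | p :: q :: t, c => by
    have := zip_foldl (q :: t) (c + ((p.1 - q.1).natAbs + 1 : Int))
    simp only [List.drop_succ_cons, List.drop_zero, List.zip_cons_cons, List.foldl_cons] at this ⊢
    rw [this, segSum]
    push_cast
    ring

theorem pathLenB_eq (ind : List (Int × Int)) (d : String) :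
    pathLenB (ind, d) = 1 + (if d = "c" ∨ d = "r" then (segSum ind : Int) else 0) := by
  unfold pathLenB
  split_ifs with h
  · rw [zip_foldl]; ring
  · rfl

theorem pathA_length_int (ind : List (Int × Int)) (d : String) (h : ind ≠ []) :
    ((pathA ind d).length : Int) = pathLenB (ind, d) := by
  rw [pathA_length ind d h, pathLenB_eq]
  split_ifs <;> push_cast <;> ring

-- min over a nonempty list is a plain fold from the head
theorem min?_cons {α κ : Type} [LinearOrder κ] (x : α) (t : List α) (key : α → κ) :
    PySem.List.min? (x :: t) key =
      some (t.foldl (fun m y => if key y < key m then y else m) x) := by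
  induction t generalizing x with
  | nil => rfl
  | cons y t ih =>
    simp only [PySem.List.min?, List.foldl_cons] at ih ⊢
    by_cases h : key y < key x <;> simp [h, ih]

-- the two selection folds agree step by step
theorem fold_inv (rest : List ((List (Int × Int)) × String)) :
    ∀ (bi : List (Int × Int)) (bd : String), bi ≠ [] → (∀ s ∈ rest, s.1 ≠ []) →
      rest.foldl (fun m y => if pathLenB y < pathLenB m then y else m) (bi, bd) =
        ((rest.foldl
            (fun st s =>
              let cl : Int := (pathA s.1 s.2).length
              if cl < st.2.2 then (s.1, s.2, cl) else st)
            (bi, bd, ((pathA bi bd).length : Int))).1,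
          (rest.foldl
            (fun st s =>
              let cl : Int := (pathA s.1 s.2).length
              if cl < st.2.2 then (s.1, s.2, cl) else st)
            (bi, bd, ((pathA bi bd).length : Int))).2.1) := by
  induction rest with
  | nil => intro bi bd _ _; rfl
  | cons s rest ih =>
    intro bi bd hbi hrest
    obtain ⟨s1, s2⟩ := s
    have hs : s1 ≠ [] := hrest (s1, s2) (by simp)
    have hrest' : ∀ x ∈ rest, x.1 ≠ [] := fun x hx => hrest x (by simp [hx])
    simp only [List.foldl_cons]
    by_cases hlt : pathLenB (s1, s2) < pathLenB (bi, bd)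
    · have hA : ((pathA s1 s2).length : Int) < ((pathA bi bd).length : Int) := by
        rw [pathA_length_int s1 s2 hs, pathA_length_int bi bd hbi]; exact hlt
      simp only [hlt, hA, ite_true]
      exact ih s1 s2 hs hrest'
    · have hA : ¬ ((pathA s1 s2).length : Int) < ((pathA bi bd).length : Int) := by
        rw [pathA_length_int s1 s2 hs, pathA_length_int bi bd hbi]; exact hlt
      simp only [hlt, hA, ite_false]
      exact ih bi bd hbi hrest'

-- ===== VERDICT (by name: the statement is the Claim_ definition above) =====
theorem best_solution_spec : Claim_equal_best_solution := by
  intro sols _ hpre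
  obtain ⟨hne, hind⟩ := hpre
  unfold Spec_best_solution best_solution best_solution_alt
  match sols with
  | [] => exact absurd rfl hne
  | (bi, bd) :: rest =>
    have hbi : bi ≠ [] := hind (bi, bd) (by simp)
    have hrest : ∀ s ∈ rest, s.1 ≠ [] := fun s hs => hind s (by simp [hs])
    rw [min?_cons, Option.getD_some, fold_inv rest bi bd hbi hrest]
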